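-- pv_equiv track=rewrite | github.com/prajyotbankade/Flow | skills/backlog-manager/backlog/server.py | compute_critical_path
-- ===== SOURCE A (Python) =====
-- def compute_unblock_cascade(start_id, blocks_map):
--     visited = set()
--     queue = list(blocks_map.get(start_id, []))
--     while queue:
--         nid = queue.pop(0)
--         if nid in visited:
--             continue
--         visited.add(nid)
--         queue.extend(blocks_map.get(nid, []))
--     return visited
--
-- def compute_critical_path(blocks_map, items_by_id, done_or_discarded):
--     cascade_counts = {iid: len(compute_unblock_cascade(iid, blocks_map)) for iid in items_by_id}
--     active_with_cascade = [
--         iid for iid, item in items_by_id.items()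
--         if item.get("status") not in done_or_discarded and cascade_counts.get(iid, 0) > 0
--     ]
--     critical_sorted = sorted(active_with_cascade, key=lambda iid: cascade_counts[iid], reverse=True)
--     return critical_sorted, cascade_counts
-- ===== SOURCE B (Python) =====
-- def compute_critical_path(blocks_map, items_by_id, done_or_discarded):
--     # Global dataflow fixpoint: instead of running a separate graph search per
--     # item, compute the full "reachable via at least one blocking edge" map for
--     # all nodes at once by iterating the monotone equation
--     #   reach[v] = set(blocks_map[v]) | union of reach[n] for n in blocks_map[v]
--     # until it stabilises, then just read off the sizes.
--     reach = {v: set() for v in blocks_map}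
--     while True:
--         new = {v: set(ns).union(*(reach.get(n, set()) for n in ns))
--                for v, ns in blocks_map.items()}
--         if new == reach:
--             break
--         reach = new
--     cascade_counts = {iid: len(reach.get(iid, set())) for iid in items_by_id}
--     active_with_cascade = [
--         iid for iid, item in items_by_id.items()
--         if item.get("status") not in done_or_discarded and cascade_counts.get(iid, 0) > 0
--     ]
--     critical_sorted = sorted(active_with_cascade, key=lambda iid: cascade_counts[iid], reverse=True)
--     return critical_sorted, cascade_counts
-- ===== Notes on version B (the rewrite author's own statement) =====
-- stated objective: alternative
-- what changed: A runs a separate queue-based BFS from every item to collect its reachable set; B instead computes one shared reachability map for ALL nodes simultaneously by iterating the monotone dataflow equation reach[v] = set(N(v)) | union of reach[n] for n in N(v) to its least fixpoint and then reads the cascade counts off that map, so no per-item graph traversal happens at all.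
import Mathlib
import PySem

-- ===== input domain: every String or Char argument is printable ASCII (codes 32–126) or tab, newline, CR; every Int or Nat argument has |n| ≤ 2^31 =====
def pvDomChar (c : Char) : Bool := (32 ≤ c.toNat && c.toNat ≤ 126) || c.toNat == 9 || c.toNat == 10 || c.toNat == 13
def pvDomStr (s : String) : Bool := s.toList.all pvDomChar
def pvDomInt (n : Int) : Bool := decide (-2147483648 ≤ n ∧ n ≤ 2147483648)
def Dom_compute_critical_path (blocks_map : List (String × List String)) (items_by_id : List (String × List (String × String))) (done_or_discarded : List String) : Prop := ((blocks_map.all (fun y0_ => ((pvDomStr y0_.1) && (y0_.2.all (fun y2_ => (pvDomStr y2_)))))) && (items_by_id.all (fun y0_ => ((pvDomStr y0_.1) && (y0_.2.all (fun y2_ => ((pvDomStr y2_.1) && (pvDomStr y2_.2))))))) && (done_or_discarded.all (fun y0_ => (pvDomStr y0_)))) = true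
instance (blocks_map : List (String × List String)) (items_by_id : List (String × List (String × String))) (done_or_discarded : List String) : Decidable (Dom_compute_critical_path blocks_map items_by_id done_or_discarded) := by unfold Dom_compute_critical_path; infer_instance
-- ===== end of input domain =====

-- B replaces A's per-item queue BFS by one global dataflow fixpoint: the whole reachability map
-- for all nodes is computed at once by iterating reach[v] = N(v) ∪ ⋃ reach[n] until stable;
-- equal return value proved below.

def pvU (bm : PySem.Dict String (List String)) : List String := bm.keys ++ bm.values.flatten
def pvV (bm : PySem.Dict String (List String)) : List String := bm.values.flatten

-- lemmas cited by port A's termination proof (they must precede the definition)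
theorem pv_filter_le (U s t : List String) (h : ∀ x ∈ s, x ∈ t) :
    (U.filter (fun u => !decide (u ∈ t))).length ≤ (U.filter (fun u => !decide (u ∈ s))).length := by
  induction U with
  | nil => simp
  | cons u U ih =>
    by_cases hs : u ∈ s
    · have ht : u ∈ t := h u hs
      simp [hs, ht]
      exact ih
    · by_cases ht : u ∈ t <;> simp [hs, ht] <;> omega

theorem pv_filter_lt (U s t : List String) (h : ∀ x ∈ s, x ∈ t) (n : String)
    (hn : n ∈ U) (hns : n ∉ s) (hnt : n ∈ t) :
    (U.filter (fun u => !decide (u ∈ t))).length < (U.filter (fun u => !decide (u ∈ s))).length := by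
  induction U with
  | nil => simp at hn
  | cons u U ih =>
    by_cases hu : u = n
    · subst hu
      have hle := pv_filter_le U s t h
      simp [hns, hnt]
      omega
    · have hn' : n ∈ U := by
        rcases List.mem_cons.mp hn with h1 | h1
        · exact absurd h1.symm hu
        · exact h1
      have := ih hn'
      by_cases hs : u ∈ s
      · have ht : u ∈ t := h u hs
        simpa [List.filter_cons, hs, ht] using this
      · by_cases ht : u ∈ t <;> simp [hs, ht] <;> omega

-- ===== PORT A =====
-- A's helper compute_unblock_cascade: queue-based BFS, nid = queue.pop(0), visited is a set
def compute_unblock_cascade_loop (bm : PySem.Dict String (List String))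
    (vis : PySem.Set String) (queue : List String) : PySem.Set String :=
  match queue with
  | [] => vis
  | n :: rest =>
    if n ∈ vis then
      compute_unblock_cascade_loop bm vis rest
    else
      compute_unblock_cascade_loop bm (PySem.Set.add vis n) (rest ++ bm.getD n [])
termination_by (((pvU bm).filter (fun u => !decide (u ∈ vis))).length, queue.length)
decreasing_by
  · exact Prod.Lex.right _ (Nat.lt_succ_self _)
  · rename_i hnv
    by_cases hU : n ∈ pvU bm
    · refine Prod.Lex.left _ _ ?_
      have : PySem.Set.add vis n = vis ++ [n] := PySem.Set.add_of_not_mem hnv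
      rw [this]
      exact pv_filter_lt _ vis (vis ++ [n]) (fun x hx => List.mem_append_left _ hx) n hU hnv
        (List.mem_append_right _ (List.mem_singleton.mpr rfl))
    · have hkey : bm.getD n [] = [] := by
        apply PySem.Dict.getD_of_not_contains
        cases hc : bm.contains n
        · rfl
        · exact absurd (List.mem_append_left _ ((PySem.Dict.contains_iff_mem_keys bm n).mp hc)) hU
      have heq : ((pvU bm).filter (fun u => !decide (u ∈ PySem.Set.add vis n))).length
          = ((pvU bm).filter (fun u => !decide (u ∈ vis))).length := by
        have : PySem.Set.add vis n = vis ++ [n] := PySem.Set.add_of_not_mem hnv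
        rw [this]
        congr 1
        apply List.filter_congr
        intro x hx
        have hxn : x ≠ n := fun h => hU (h ▸ hx)
        simp [List.mem_append, hxn]
      rw [heq, hkey]
      exact Prod.Lex.right _ (by simp)

def compute_unblock_cascade (start_id : String) (blocks_map : PySem.Dict String (List String)) :
    PySem.Set String :=
  compute_unblock_cascade_loop blocks_map PySem.Set.empty (blocks_map.getD start_id [])

-- item.get("status") not in done_or_discarded  (shared by both ports)
def pvStatusOk (item : List (String × String)) (dod : List String) : Bool :=
  match (PySem.Dict.mk item).get? "status" with
  | none => true
  | some s => decide (s ∉ dod)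

def compute_critical_path (blocks_map : List (String × List String))
    (items_by_id : List (String × List (String × String))) (done_or_discarded : List String) :
    List String × (List (String × Int)) :=
  let bm := PySem.Dict.mk blocks_map
  let cascade_counts : PySem.Dict String Int :=
    (items_by_id.map (fun p => p.1)).foldl
      (fun d iid => d.insert iid ((compute_unblock_cascade iid bm).length : Int)) PySem.Dict.empty
  let active := (items_by_id.filter
      (fun p => pvStatusOk p.2 done_or_discarded && decide (cascade_counts.getD p.1 0 > 0))).map
      (fun p => p.1)
  let critical := PySem.List.sorted active (fun iid => cascade_counts.getD iid 0) true
  (critical, cascade_counts.items)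

-- ===== PORT B =====
-- one round of the dataflow comprehension {v: set(ns).union(*(reach.get(n, set()) for n in ns)) for v, ns in blocks_map.items()}
def pvRound (bm reach : PySem.Dict String (List String)) : PySem.Dict String (List String) :=
  PySem.Dict.mk (bm.items.map (fun p =>
    (p.1, p.2.foldl (fun s n => PySem.Set.update s (reach.getD n [])) (PySem.Set.ofList p.2))))

-- Python's dict equality `new == reach`: same key set, and per key equal value sets
def pvDictSetEq (a b : PySem.Dict String (List String)) : Bool :=
  PySem.Set.equal (PySem.Set.ofList a.keys) (PySem.Set.ofList b.keys) &&
  a.keys.all (fun v => PySem.Set.equal (a.getD v []) (b.getD v []))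

-- the `while True:` loop; the fuel is a totalization guard only (proved sufficient below:
-- with this fuel the loop always exits through the equality test, as in the Python)
def pvFixLoop (bm : PySem.Dict String (List String)) :
    Nat → PySem.Dict String (List String) → PySem.Dict String (List String)
  | 0, reach => reach
  | fuel + 1, reach =>
    if pvDictSetEq (pvRound bm reach) reach then reach
    else pvFixLoop bm fuel (pvRound bm reach)

def pvReach (bm : PySem.Dict String (List String)) : PySem.Dict String (List String) :=
  pvFixLoop bm (bm.items.length * (pvV bm).length + 1)
    (PySem.Dict.mk (bm.items.map (fun p => (p.1, ([] : List String)))))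

def compute_critical_path_alt (blocks_map : List (String × List String))
    (items_by_id : List (String × List (String × String))) (done_or_discarded : List String) :
    List String × (List (String × Int)) :=
  let bm := PySem.Dict.mk blocks_map
  let reach := pvReach bm
  let cascade_counts : PySem.Dict String Int :=
    (items_by_id.map (fun p => p.1)).foldl
      (fun d iid => d.insert iid (((reach.getD iid []).length : Int))) PySem.Dict.empty
  let active := (items_by_id.filter
      (fun p => pvStatusOk p.2 done_or_discarded && decide (cascade_counts.getD p.1 0 > 0))).map
      (fun p => p.1)
  let critical := PySem.List.sorted active (fun iid => cascade_counts.getD iid 0) true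
  (critical, cascade_counts.items)

-- ===== PRECONDITION & SPEC =====
def Spec_compute_critical_path (blocks_map : List (String × List String)) (items_by_id : List (String × List (String × String))) (done_or_discarded : List String) (out : List String × (List (String × Int))) : Prop := out = compute_critical_path_alt blocks_map items_by_id done_or_discarded
instance (blocks_map : List (String × List String)) (items_by_id : List (String × List (String × String))) (done_or_discarded : List String) (out : List String × (List (String × Int))) : Decidable (Spec_compute_critical_path blocks_map items_by_id done_or_discarded out) := by unfold Spec_compute_critical_path; infer_instance

-- ===== CLAIM (what is proved, stated in full; the proofs are below) =====
def Claim_equal_compute_critical_path : Prop := ∀ (blocks_map : List (String × List String)) (items_by_id : List (String × List (String × String))) (done_or_discarded : List String), Dom_compute_critical_path blocks_map items_by_id done_or_discarded → Spec_compute_critical_path blocks_map items_by_id done_or_discarded (compute_critical_path blocks_map items_by_id done_or_discarded)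

-- ===== LEMMAS AND PROOFS =====
def pvEdge (bm : PySem.Dict String (List String)) (a b : String) : Prop := b ∈ bm.getD a []
def pvReaches (bm : PySem.Dict String (List String)) : String → String → Prop :=
  Relation.ReflTransGen (pvEdge bm)

theorem pv_reach_escape (bm : PySem.Dict String (List String)) (vis Q : List String)
    (H : ∀ v ∈ vis, ∀ w ∈ bm.getD v [], w ∈ vis ∨ w ∈ Q) {v x : String}
    (hv : v ∈ vis) (hr : pvReaches bm v x) : x ∈ vis ∨ ∃ q ∈ Q, pvReaches bm q x := by
  induction hr using Relation.ReflTransGen.head_induction_on with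
  | refl => exact Or.inl hv
  | head hab _ ih =>
    rename_i a b _
    rcases H a hv b hab with h | h
    · exact ih h
    · exact Or.inr ⟨b, h, by assumption⟩

theorem pv_bfs_char (bm : PySem.Dict String (List String)) (vis : PySem.Set String)
    (queue : List String)
    (H : ∀ v ∈ vis, ∀ w ∈ bm.getD v [], w ∈ vis ∨ w ∈ queue) (x : String) :
    x ∈ compute_unblock_cascade_loop bm vis queue ↔
      x ∈ vis ∨ ∃ q ∈ queue, pvReaches bm q x := by
  induction vis, queue using compute_unblock_cascade_loop.induct bm with
  | case1 vis => simp [compute_unblock_cascade_loop]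
  | case2 vis n rest hmem ih =>
    rw [compute_unblock_cascade_loop, if_pos hmem]
    have H' : ∀ v ∈ vis, ∀ w ∈ bm.getD v [], w ∈ vis ∨ w ∈ rest := by
      intro v hv w hw
      rcases H v hv w hw with h | h
      · exact Or.inl h
      · rcases List.mem_cons.mp h with h | h
        · exact Or.inl (h ▸ hmem)
        · exact Or.inr h
    rw [ih H']
    constructor
    · rintro (h | ⟨q, hq, hr⟩)
      · exact Or.inl h
      · exact Or.inr ⟨q, List.mem_cons_of_mem _ hq, hr⟩
    · rintro (h | ⟨q, hq, hr⟩)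
      · exact Or.inl h
      · rcases List.mem_cons.mp hq with h | h
        · subst h
          exact pv_reach_escape bm vis rest H' hmem hr
        · exact Or.inr ⟨q, h, hr⟩
  | case3 vis n rest hmem ih =>
    rw [compute_unblock_cascade_loop, if_neg hmem]
    have hadd : PySem.Set.add vis n = vis ++ [n] := PySem.Set.add_of_not_mem hmem
    have H' : ∀ v ∈ PySem.Set.add vis n, ∀ w ∈ bm.getD v [], w ∈ PySem.Set.add vis n ∨ w ∈ rest ++ bm.getD n [] := by
      rw [hadd]
      intro v hv w hw
      rcases List.mem_append.mp hv with hv | hv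
      · rcases H v hv w hw with h | h
        · exact Or.inl (List.mem_append_left _ h)
        · rcases List.mem_cons.mp h with h | h
          · exact Or.inl (List.mem_append_right _ (by simp [h]))
          · exact Or.inr (List.mem_append_left _ h)
      · have : v = n := by simpa using hv
        subst this
        exact Or.inr (List.mem_append_right _ hw)
    rw [ih H']
    constructor
    · rintro (h | ⟨q, hq, hr⟩)
      · rw [hadd] at h
        rcases List.mem_append.mp h with h | h
        · exact Or.inl h
        · have : x = n := by simpa using h
          exact Or.inr ⟨n, List.mem_cons_self, this ▸ Relation.ReflTransGen.refl⟩
      · rcases List.mem_append.mp hq with h | h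
        · exact Or.inr ⟨q, List.mem_cons_of_mem _ h, hr⟩
        · exact Or.inr ⟨n, List.mem_cons_self, Relation.ReflTransGen.head h hr⟩
    · rintro (h | ⟨q, hq, hr⟩)
      · exact Or.inl (by rw [hadd]; exact List.mem_append_left _ h)
      · rcases List.mem_cons.mp hq with h | h
        · subst h
          rcases Relation.ReflTransGen.cases_head hr with h | ⟨w, hw, hr'⟩
          · exact Or.inl (by rw [hadd]; simp [h])
          · exact Or.inr ⟨w, List.mem_append_right _ hw, hr'⟩
        · exact Or.inr ⟨q, List.mem_append_left _ h, hr⟩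

theorem pv_bfs_nodup (bm : PySem.Dict String (List String)) (vis : PySem.Set String)
    (queue : List String) (h : vis.Nodup) :
    (compute_unblock_cascade_loop bm vis queue).Nodup := by
  induction vis, queue using compute_unblock_cascade_loop.induct bm with
  | case1 vis => simpa [compute_unblock_cascade_loop] using h
  | case2 vis n rest hmem ih => rw [compute_unblock_cascade_loop, if_pos hmem]; exact ih h
  | case3 vis n rest hmem ih =>
    rw [compute_unblock_cascade_loop, if_neg hmem]
    exact ih (PySem.Set.nodup_add vis n h)

theorem pv_getD_sub (bm : PySem.Dict String (List String)) {g w : String}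
    (hw : w ∈ bm.getD g []) : w ∈ pvV bm := by
  rcases hg : bm.get? g with _ | l
  · rw [PySem.Dict.getD_eq_get?_getD, hg] at hw; simp at hw
  · rw [PySem.Dict.getD_eq_get?_getD, hg] at hw
    simp at hw
    have : (g, l) ∈ bm.items := PySem.Dict.mem_items_of_get?_eq_some bm hg
    have hl : l ∈ bm.values := by
      unfold PySem.Dict.values
      exact List.mem_map.mpr ⟨(g, l), this, rfl⟩
    exact List.mem_flatten.mpr ⟨l, hl, hw⟩

theorem pv_getD_mem_get? (bm : PySem.Dict String (List String)) {c w : String}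
    (h : w ∈ bm.getD c []) : ∃ ns, bm.get? c = some ns ∧ w ∈ ns := by
  rcases hg : bm.get? c with _ | ns
  · rw [PySem.Dict.getD_eq_get?_getD, hg] at h; simp at h
  · rw [PySem.Dict.getD_eq_get?_getD, hg] at h
    exact ⟨ns, rfl, by simpa using h⟩

-- lookups in the dict built by a comprehension over bm.items
theorem pv_mk_map_get? (l : List (String × List String)) (F : List String → List String)
    (v : String) :
    (PySem.Dict.mk (l.map (fun p => (p.1, F p.2)))).get? v = ((PySem.Dict.mk l).get? v).map F := by
  induction l with
  | nil => rfl
  | cons p l ih =>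
    simp only [List.map_cons]
    rw [PySem.Dict.get?_mk_cons, PySem.Dict.get?_mk_cons]
    cases h : (p.1 == v)
    · simp [h, ih]
    · simp [h]

theorem pv_round_get? (bm R : PySem.Dict String (List String)) (v : String) :
    (pvRound bm R).get? v = (bm.get? v).map
      (fun ns => ns.foldl (fun s n => PySem.Set.update s (R.getD n [])) (PySem.Set.ofList ns)) := by
  unfold pvRound
  exact pv_mk_map_get? bm.items
    (fun ns => ns.foldl (fun s n => PySem.Set.update s (R.getD n [])) (PySem.Set.ofList ns)) v

theorem pv_mem_foldl_update (R : PySem.Dict String (List String)) (ns : List String)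
    (init : List String) (x : String) :
    x ∈ ns.foldl (fun s n => PySem.Set.update s (R.getD n [])) init ↔
      x ∈ init ∨ ∃ n ∈ ns, x ∈ R.getD n [] := by
  induction ns generalizing init with
  | nil => simp
  | cons n ns ih =>
    rw [List.foldl_cons, ih]
    simp [PySem.Set.mem_update]
    tauto

theorem pv_nodup_foldl_update (R : PySem.Dict String (List String)) (ns : List String)
    (init : List String) (h : init.Nodup) :
    (ns.foldl (fun s n => PySem.Set.update s (R.getD n [])) init).Nodup := by
  induction ns generalizing init with
  | nil => exact h
  | cons n ns ih => exact ih _ (PySem.Set.nodup_update _ _ h)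

theorem pv_round_mem (bm R : PySem.Dict String (List String)) (v x : String) :
    x ∈ (pvRound bm R).getD v [] ↔
      ∃ ns, bm.get? v = some ns ∧ (x ∈ ns ∨ ∃ n ∈ ns, x ∈ R.getD n []) := by
  rw [PySem.Dict.getD_eq_get?_getD, pv_round_get?]
  cases h : bm.get? v with
  | none => simp
  | some ns => simp [pv_mem_foldl_update, PySem.Set.mem_ofList]

theorem pv_round_keys (bm R : PySem.Dict String (List String)) :
    (pvRound bm R).keys = bm.keys := by
  unfold pvRound PySem.Dict.keys
  simp

-- invariant maintained along the fixpoint chain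
def pvInv (bm R : PySem.Dict String (List String)) : Prop :=
  R.keys = bm.keys ∧
  (∀ v, bm.get? v = none → R.getD v [] = []) ∧
  (∀ v, (R.getD v []).Nodup) ∧
  (∀ v x, x ∈ R.getD v [] → x ∈ pvV bm) ∧
  (∀ v x, x ∈ R.getD v [] → x ∈ (pvRound bm R).getD v []) ∧
  (∀ v x, x ∈ R.getD v [] → ∃ q ∈ bm.getD v [], pvReaches bm q x)

theorem pv_round_mono (bm R R' : PySem.Dict String (List String))
    (h : ∀ v x, x ∈ R.getD v [] → x ∈ R'.getD v []) :
    ∀ v x, x ∈ (pvRound bm R).getD v [] → x ∈ (pvRound bm R').getD v [] := by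
  intro v x hx
  rw [pv_round_mem] at hx ⊢
  obtain ⟨ns, hns, h2⟩ := hx
  refine ⟨ns, hns, ?_⟩
  rcases h2 with h2 | ⟨n, hn, hxn⟩
  · exact Or.inl h2
  · exact Or.inr ⟨n, hn, h n x hxn⟩

theorem pv_inv_round (bm R : PySem.Dict String (List String)) (h : pvInv bm R) :
    pvInv bm (pvRound bm R) := by
  obtain ⟨hk, h0, hnd, hV, hprog, hsound⟩ := h
  refine ⟨pv_round_keys bm R, ?_, ?_, ?_, pv_round_mono bm R (pvRound bm R) hprog, ?_⟩
  · intro v hv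
    rw [PySem.Dict.getD_eq_get?_getD, pv_round_get?, hv]
    rfl
  · intro v
    rw [PySem.Dict.getD_eq_get?_getD, pv_round_get?]
    cases h : bm.get? v with
    | none => simp
    | some ns =>
      exact pv_nodup_foldl_update R ns _ (PySem.Set.nodup_ofList _)
  · intro v x hx
    rw [pv_round_mem] at hx
    obtain ⟨ns, hns, hx⟩ := hx
    rcases hx with hx | ⟨n, hn, hx⟩
    · exact pv_getD_sub bm (by rw [PySem.Dict.getD_eq_get?_getD, hns]; exact hx)
    · exact hV n x hx
  · intro v x hx
    rw [pv_round_mem] at hx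
    obtain ⟨ns, hns, hx⟩ := hx
    have hnsd : bm.getD v [] = ns := by rw [PySem.Dict.getD_eq_get?_getD, hns]; rfl
    rcases hx with hx | ⟨n, hn, hx⟩
    · exact ⟨x, hnsd ▸ hx, Relation.ReflTransGen.refl⟩
    · obtain ⟨q, hq, hr⟩ := hsound n x hx
      exact ⟨n, hnsd ▸ hn, Relation.ReflTransGen.head hq hr⟩

theorem pv_init_getD (bm : PySem.Dict String (List String)) (v : String) :
    (PySem.Dict.mk (bm.items.map (fun p => (p.1, ([] : List String))))).getD v [] = [] := by
  rw [PySem.Dict.getD_eq_get?_getD, pv_mk_map_get? bm.items (fun _ => []) v]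
  cases bm.get? v <;> rfl

theorem pv_init_keys (bm : PySem.Dict String (List String)) :
    (PySem.Dict.mk (bm.items.map (fun p => (p.1, ([] : List String))))).keys = bm.keys := by
  unfold PySem.Dict.keys
  simp

theorem pv_inv_init (bm : PySem.Dict String (List String)) :
    pvInv bm (PySem.Dict.mk (bm.items.map (fun p => (p.1, ([] : List String))))) := by
  refine ⟨pv_init_keys bm, fun v _ => pv_init_getD bm v, fun v => by rw [pv_init_getD]; exact List.nodup_nil,
    fun v x hx => ?_, fun v x hx => ?_, fun v x hx => ?_⟩ <;>
    rw [pv_init_getD] at hx <;> cases hx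

theorem pv_fix_of_eqTrue (bm R : PySem.Dict String (List String)) (hinv : pvInv bm R)
    (h : pvDictSetEq (pvRound bm R) R = true) :
    ∀ v x, x ∈ (pvRound bm R).getD v [] ↔ x ∈ R.getD v [] := by
  intro v x
  unfold pvDictSetEq at h
  rw [Bool.and_eq_true, List.all_eq_true] at h
  obtain ⟨-, h2⟩ := h
  by_cases hv : v ∈ (pvRound bm R).keys
  · have := h2 v hv
    rw [PySem.Set.equal_iff] at this
    exact this x
  · have hbm : bm.get? v = none :=
      (PySem.Dict.get?_eq_none_iff_not_mem_keys bm v).mpr (by rwa [pv_round_keys] at hv)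
    constructor
    · intro hx
      rw [pv_round_mem] at hx
      obtain ⟨ns, hns, -⟩ := hx
      rw [hbm] at hns
      cases hns
    · intro hx
      rw [hinv.2.1 v hbm] at hx
      cases hx

def pvMsr (bm R : PySem.Dict String (List String)) : Nat :=
  (bm.items.map (fun p => (R.getD p.1 []).length)).sum

theorem pv_len_le_of_nodup_subset (l l' : List String) (hnd : l.Nodup)
    (hsub : ∀ x ∈ l, x ∈ l') : l.length ≤ l'.length := by
  calc l.length = l.toFinset.card := (List.toFinset_card_of_nodup hnd).symm
    _ ≤ l'.toFinset.card := Finset.card_le_card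
        (fun x hx => List.mem_toFinset.mpr (hsub x (List.mem_toFinset.mp hx)))
    _ ≤ l'.length := l'.toFinset_card_le

theorem pv_msr_le (bm R : PySem.Dict String (List String)) (hinv : pvInv bm R) :
    pvMsr bm R ≤ bm.items.length * (pvV bm).length := by
  obtain ⟨hk, h0, hnd, hV, hprog, hsound⟩ := hinv
  unfold pvMsr
  have hb : ∀ x ∈ bm.items.map (fun p => (R.getD p.1 []).length), x ≤ (pvV bm).length := by
    intro x hx
    obtain ⟨p, hp, rfl⟩ := List.mem_map.mp hx
    exact pv_len_le_of_nodup_subset _ _ (hnd p.1) (fun y hy => hV p.1 y hy)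
  have := List.sum_le_card_nsmul (bm.items.map (fun p => (R.getD p.1 []).length))
    ((pvV bm).length) hb
  simpa [smul_eq_mul] using this

theorem pv_sum_lt {α : Type} (l : List α) (f g : α → Nat) (hle : ∀ p ∈ l, f p ≤ g p)
    (p0 : α) (hp0 : p0 ∈ l) (hlt : f p0 < g p0) :
    (l.map f).sum < (l.map g).sum := by
  induction l with
  | nil => cases hp0
  | cons a l ih =>
    simp only [List.map_cons, List.sum_cons]
    rcases List.mem_cons.mp hp0 with h | h
    · subst h
      have hrest : (l.map f).sum ≤ (l.map g).sum :=
        List.sum_le_sum (fun p hp => hle p (List.mem_cons_of_mem _ hp))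
      omega
    · have h1 := hle a List.mem_cons_self
      have h2 := ih (fun p hp => hle p (List.mem_cons_of_mem _ hp)) h
      omega

theorem pv_msr_lt (bm R : PySem.Dict String (List String)) (hinv : pvInv bm R)
    (hne : pvDictSetEq (pvRound bm R) R = false) :
    pvMsr bm R < pvMsr bm (pvRound bm R) := by
  obtain ⟨hk, h0, hnd, hV, hprog, hsound⟩ := hinv
  unfold pvDictSetEq at hne
  rw [Bool.and_eq_false_iff] at hne
  rcases hne with hne | hne
  · rw [pv_round_keys, hk, (PySem.Set.equal_iff _ _).mpr (fun _ => Iff.rfl)] at hne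
    cases hne
  · rw [List.all_eq_false] at hne
    obtain ⟨v, hv, hveq⟩ := hne
    have hnotall : ¬ ∀ x, x ∈ (pvRound bm R).getD v [] ↔ x ∈ R.getD v [] := by
      intro hall
      rw [(PySem.Set.equal_iff _ _).mpr hall] at hveq
      exact hveq rfl
    have hx : ∃ x, x ∈ (pvRound bm R).getD v [] ∧ x ∉ R.getD v [] := by
      by_contra hc
      push_neg at hc
      apply hnotall
      intro x
      exact ⟨fun h => by_contra (fun h2 => h2 (hc x h)), fun h => hprog v x h⟩
    obtain ⟨x, hx1, hx2⟩ := hx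
    rw [pv_round_keys] at hv
    obtain ⟨p0, hp0, hp0v⟩ := List.mem_map.mp hv
    unfold pvMsr
    refine pv_sum_lt bm.items _ _ ?_ p0 hp0 ?_
    · intro p _
      exact pv_len_le_of_nodup_subset _ _ (hnd p.1) (fun y hy => hprog p.1 y hy)
    · rw [hp0v]
      have hcons : (x :: R.getD v []).Nodup := List.nodup_cons.mpr ⟨hx2, hnd v⟩
      have hsub : ∀ y ∈ x :: R.getD v [], y ∈ (pvRound bm R).getD v [] := by
        intro y hy
        rcases List.mem_cons.mp hy with h | h
        · exact h ▸ hx1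
        · exact hprog v y h
      have := pv_len_le_of_nodup_subset _ _ hcons hsub
      simp only [List.length_cons] at this
      omega

theorem pv_loop_good (bm : PySem.Dict String (List String)) :
    ∀ (fuel : Nat) (R : PySem.Dict String (List String)), pvInv bm R →
      bm.items.length * (pvV bm).length < pvMsr bm R + fuel →
      pvInv bm (pvFixLoop bm fuel R) ∧
        (∀ v x, x ∈ (pvRound bm (pvFixLoop bm fuel R)).getD v [] ↔
          x ∈ (pvFixLoop bm fuel R).getD v []) := by
  intro fuel
  induction fuel with
  | zero =>
    intro R hinv hlt
    have := pv_msr_le bm R hinv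
    omega
  | succ fuel ih =>
    intro R hinv hlt
    rw [pvFixLoop]
    cases heq : pvDictSetEq (pvRound bm R) R with
    | false =>
      rw [if_neg (by simp)]
      have hmlt := pv_msr_lt bm R hinv heq
      exact ih (pvRound bm R) (pv_inv_round bm R hinv) (by omega)
    | true =>
      rw [if_pos rfl]
      exact ⟨hinv, pv_fix_of_eqTrue bm R hinv heq⟩

theorem pv_reach_good (bm : PySem.Dict String (List String)) :
    pvInv bm (pvReach bm) ∧
      (∀ v x, x ∈ (pvRound bm (pvReach bm)).getD v [] ↔ x ∈ (pvReach bm).getD v []) := by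
  unfold pvReach
  exact pv_loop_good bm _ _ (pv_inv_init bm) (by omega)

theorem pv_reach_char (bm : PySem.Dict String (List String)) (v x : String) :
    x ∈ (pvReach bm).getD v [] ↔ ∃ q ∈ bm.getD v [], pvReaches bm q x := by
  obtain ⟨hinv, hfix⟩ := pv_reach_good bm
  constructor
  · exact fun h => hinv.2.2.2.2.2 v x h
  · rintro ⟨q, hq, hr⟩
    have L1 : ∀ a b : String, pvReaches bm a b → b = a ∨ b ∈ (pvReach bm).getD a [] := by
      intro a b hab
      induction hab using Relation.ReflTransGen.head_induction_on with
      | refl => exact Or.inl rfl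
      | head hedge _ ihh =>
        rename_i c w _
        right
        obtain ⟨ns, hg, hw⟩ := pv_getD_mem_get? bm hedge
        rcases ihh with h | h
        · exact (hfix c b).mp ((pv_round_mem bm _ c b).mpr ⟨ns, hg, Or.inl (h ▸ hw)⟩)
        · exact (hfix c b).mp ((pv_round_mem bm _ c b).mpr ⟨ns, hg, Or.inr ⟨w, hw, h⟩⟩)
    obtain ⟨ns, hg, hq'⟩ := pv_getD_mem_get? bm hq
    rcases L1 q x hr with h | h
    · exact (hfix v x).mp ((pv_round_mem bm _ v x).mpr ⟨ns, hg, Or.inl (h ▸ hq')⟩)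
    · exact (hfix v x).mp ((pv_round_mem bm _ v x).mpr ⟨ns, hg, Or.inr ⟨q, hq', h⟩⟩)

theorem pv_cascade_eq (bm : PySem.Dict String (List String)) (s : String) :
    ((compute_unblock_cascade s bm).length : Int) = (((pvReach bm).getD s []).length : Int) := by
  have hA := pv_bfs_char bm PySem.Set.empty (bm.getD s [])
    (by intro v hv; simp [PySem.Set.empty] at hv)
  have hperm : (compute_unblock_cascade s bm).Perm ((pvReach bm).getD s []) := by
    refine (List.perm_ext_iff_of_nodup
      (pv_bfs_nodup bm _ _ (by simp [PySem.Set.empty]))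
      ((pv_reach_good bm).1.2.2.1 s)).mpr ?_
    intro a
    rw [hA a, pv_reach_char]
    simp [PySem.Set.empty]
  exact congrArg _ hperm.length_eq

theorem compute_critical_path_eq (blocks_map : List (String × List String))
    (items_by_id : List (String × List (String × String))) (done_or_discarded : List String) :
    compute_critical_path blocks_map items_by_id done_or_discarded =
      compute_critical_path_alt blocks_map items_by_id done_or_discarded := by
  unfold compute_critical_path compute_critical_path_alt
  have hdict : (items_by_id.map (fun p => p.1)).foldl
      (fun d iid => d.insert iid
        ((compute_unblock_cascade iid (PySem.Dict.mk blocks_map)).length : Int)) PySem.Dict.empty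
      = (items_by_id.map (fun p => p.1)).foldl
      (fun d iid => d.insert iid
        ((((pvReach (PySem.Dict.mk blocks_map)).getD iid []).length : Int))) PySem.Dict.empty :=
    PySem.List.foldl_congr_mem _ _ _ _ (fun acc iid _ => by rw [pv_cascade_eq])
  simp only [hdict]

-- ===== VERDICT (by name: the statement is the Claim_ definition above) =====
theorem compute_critical_path_spec : Claim_equal_compute_critical_path := by
  intro blocks_map items_by_id done_or_discarded _
  unfold Spec_compute_critical_path
  exact compute_critical_path_eq blocks_map items_by_id done_or_discarded
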